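-- pv_equiv track=rewrite | github.com/mataraimov/2048 | 2048_Nuradil.py | updater
-- ===== SOURCE A (Python) =====
-- def updater(m,l,hw):
--     #очищаем список
--     m.clear()
--     #проходимся по всем ячейкам главного списка и если ячейка пустая индексируем ее и добавляем индекс в список пустых ячеек
--     mx = 0
--     for i in range(hw):
--         for j in range(hw):
--             if len(str(l[i][j]))>mx:
--                 mx = len(str(l[i][j]))
--             if l[i][j]%2==1:
--                 l[i][j]-=1
--             if l[i][j]==0:
--                 a=indexer(i,j,hw)
--                 m.append(a)
--     return mx
--
-- def indexer(a,b,hw):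
--     return(a*hw+b+1)
-- ===== SOURCE B (Python) =====
-- def updater(m, l, hw):
--     # Pipeline over a materialized snapshot instead of a fused mutate-and-test scan.
--     # A cell ends up empty exactly when its ORIGINAL value is 0 or 1, so m is derived
--     # from the snapshot with that predicate; the grid update is a branch-free bit clear.
--     idx = range(hw)
--     cells = [(i * hw + j + 1, l[i][j]) for i in idx for j in idx]
--     mx = max((len(str(x)) for _, x in cells), default=0)
--     m[:] = [k for k, x in cells if x in (0, 1)]
--     for i in idx:
--         for j in idx:
--             l[i][j] &= -2
--     return mx
-- ===== Notes on version B (the rewrite author's own statement) =====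
-- stated objective: alternative
-- what changed: Replaces A's fused mutate-then-test scan by a pipeline over a materialized (index, value) snapshot: mx and m are both derived from the original values (m via the algebraic fact that a cell ends empty iff its original value is 0 or 1, removing the read-after-write dependence), and the grid update becomes a separate branch-free bit-clear sweep (x &= -2) instead of odd-test-and-decrement.
import Mathlib
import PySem

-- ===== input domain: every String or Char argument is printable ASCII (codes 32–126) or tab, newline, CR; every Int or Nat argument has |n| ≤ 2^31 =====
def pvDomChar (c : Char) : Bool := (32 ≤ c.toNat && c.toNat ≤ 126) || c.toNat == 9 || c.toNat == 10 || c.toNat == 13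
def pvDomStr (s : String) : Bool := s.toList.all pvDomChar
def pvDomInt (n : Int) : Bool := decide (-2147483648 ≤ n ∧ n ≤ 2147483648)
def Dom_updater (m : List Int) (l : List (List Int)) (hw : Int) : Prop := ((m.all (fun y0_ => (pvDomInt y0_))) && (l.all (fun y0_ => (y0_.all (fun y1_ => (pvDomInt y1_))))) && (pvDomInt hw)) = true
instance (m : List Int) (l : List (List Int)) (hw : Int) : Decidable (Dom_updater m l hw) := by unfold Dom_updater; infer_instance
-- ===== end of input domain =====

-- B replaces A's fused mutate-then-test scan by a pipeline over a materialized
-- (index, value) snapshot of the original grid: mx and m are both derived from the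
-- original values (a cell ends empty iff its original value is 0 or 1), and the grid
-- update is a separate branch-free bit-clear sweep.  Both Pythons mutate m and l in
-- place to the same final state; the equivalence proved here is about the RETURN
-- value (mx) only.

-- width of str(v) in Python, as an Int (len(str(v)))
def pvW (v : Int) : Int := PySem.Str.len (PySem.Int.toStr v)

-- l[i][j], totalised with defaults; inside Pre_updater every access is in range
def pvCell (L : List (List Int)) (i j : Int) : Int :=
  PySem.List.pyGetD (PySem.List.pyGetD L i []) j 0

-- ===== PORT A =====
-- body of A's inner loop, on the state (mx, m, l)
def pvStepA (hw i : Int) (st : Int × List Int × List (List Int)) (j : Int) :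
    Int × List Int × List (List Int) :=
  let mx := st.1
  let mm := st.2.1
  let L := st.2.2
  -- if len(str(l[i][j])) > mx: mx = len(str(l[i][j]))
  let mx' := if mx < pvW (pvCell L i j) then pvW (pvCell L i j) else mx
  -- if l[i][j] % 2 == 1: l[i][j] -= 1
  let L' := if PySem.Int.mod (pvCell L i j) 2 = 1 then
      PySem.List.pySetD L i (PySem.List.pySetD (PySem.List.pyGetD L i []) j (pvCell L i j - 1))
    else L
  -- if l[i][j] == 0: m.append(indexer(i, j, hw))   (re-reads the possibly decremented cell)
  let mm' := if pvCell L' i j = 0 then mm ++ [i * hw + j + 1] else mm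
  (mx', mm', L')

def updater (m : List Int) (l : List (List Int)) (hw : Int) : Int :=
  -- m.clear() makes the list state start at []; the function returns mx = first component
  ((PySem.List.pyRange 0 hw 1).foldl
      (fun st i => (PySem.List.pyRange 0 hw 1).foldl (pvStepA hw i) st)
      ((0 : Int), ([] : List Int), l)).1

-- ===== PORT B =====
-- cells = [(i*hw+j+1, l[i][j]) for i in idx for j in idx];
-- mx = max((len(str(x)) for _, x in cells), default=0).
-- Source B's remaining statements (m[:] = … and the l[i][j] &= -2 sweep) only mutate m and l
-- in place and do not touch mx, so the port of the return value is the snapshot + max.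
def updater_alt (m : List Int) (l : List (List Int)) (hw : Int) : Int :=
  let idx := PySem.List.pyRange 0 hw 1
  let cells := idx.flatMap (fun i => idx.map (fun j => (i * hw + j + 1, pvCell l i j)))
  PySem.List.maxD (cells.map (fun p => pvW p.2)) (fun y => y) 0

-- ===== PRECONDITION & SPEC =====
-- Pre_ excludes exactly the inputs where Python A raises IndexError: hw rows must exist
-- and each of the first hw rows must have at least hw entries.
def Pre_updater (m : List Int) (l : List (List Int)) (hw : Int) : Prop :=
  hw ≤ (l.length : Int) ∧ ∀ row ∈ l.take hw.toNat, hw ≤ (row.length : Int)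
instance (m : List Int) (l : List (List Int)) (hw : Int) : Decidable (Pre_updater m l hw) := by
  unfold Pre_updater; infer_instance

def pvWitness_updater : List Int × List (List Int) × Int := ([7], [[1, 2], [10, 4]], 2)

def Spec_updater (m : List Int) (l : List (List Int)) (hw : Int) (out : Int) : Prop :=
  out = updater_alt m l hw
instance (m : List Int) (l : List (List Int)) (hw : Int) (out : Int) :
    Decidable (Spec_updater m l hw out) := by unfold Spec_updater; infer_instance

-- ===== CLAIM (what is proved, stated in full; the proofs are below) =====
def Claim_equal_updater : Prop := ∀ (m : List Int) (l : List (List Int)) (hw : Int),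
  Dom_updater m l hw → Pre_updater m l hw → Spec_updater m l hw (updater m l hw)

-- ===== LEMMAS AND PROOFS =====

-- str(v) has at least one character
lemma pv_toDigitsCore_len_mono (b : Nat) :
    ∀ (f n : Nat) (l : List Char), l.length ≤ (Nat.toDigitsCore b f n l).length := by
  intro f
  induction f with
  | zero => intro n l; simp [Nat.toDigitsCore]
  | succ f ih =>
    intro n l
    simp only [Nat.toDigitsCore]
    split
    · simp
    · exact le_trans (by simp) (ih (n / b) (Nat.digitChar (n % b) :: l))

lemma pv_toDigits_len_pos (b n : Nat) : 1 ≤ (Nat.toDigits b n).length := by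
  unfold Nat.toDigits
  simp only [Nat.toDigitsCore]
  split
  · simp
  · exact le_trans (by simp) (pv_toDigitsCore_len_mono b n (n / b) [Nat.digitChar (n % b)])

lemma pvW_pos (v : Int) : 1 ≤ pvW v := by
  unfold pvW
  rw [PySem.Str.len_eq, PySem.Int.toList_toStr]
  unfold PySem.Int.toChars
  split
  · simp
  · have := pv_toDigits_len_pos 10 v.toNat
    omega

-- max(ws, default=0) is the running strict-max loop when every element is ≥ 1
lemma pv_if_eq_max (a x : Int) : (if a < x then x else a) = max a x := by
  rw [max_def]; split_ifs <;> omega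

lemma pv_foldl_if_max (t : List Int) : ∀ a : Int,
    t.foldl (fun m x => if m < x then x else m) a = t.foldl max a := by
  induction t with
  | nil => intro a; rfl
  | cons x t _ => intro a; simp only [List.foldl_cons, pv_if_eq_max]

lemma pv_maxD_pos (ws : List Int) (h : ∀ x ∈ ws, 1 ≤ x) :
    PySem.List.maxD ws (fun y => y) 0 = ws.foldl (fun m x => if m < x then x else m) 0 := by
  cases ws with
  | nil => rfl
  | cons x t =>
    have hx : (0 : Int) ≤ x := le_trans (by norm_num) (h x (by simp))
    unfold PySem.List.maxD
    rw [PySem.List.max?_id_cons, Option.getD_some, pv_foldl_if_max, List.foldl_cons,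
      max_eq_right hx]

lemma pv_foldl_flatMap {α β σ : Type} (g : α → List β) (f : σ → β → σ) :
    ∀ (l : List α) (a : σ), (l.flatMap g).foldl f a = l.foldl (fun a x => (g x).foldl f a) a := by
  intro l
  induction l with
  | nil => intro a; rfl
  | cons x t ih => intro a; simp [List.flatMap_cons, List.foldl_append, ih]

-- the state list agrees with the original grid on every cell at or after position (i, j)
def pvAgree (l₀ L : List (List Int)) (i j : Int) : Prop :=
  ∀ a b : Int, 0 ≤ a → 0 ≤ b → (i < a ∨ (a = i ∧ j ≤ b)) → pvCell L a b = pvCell l₀ a b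

-- writing cell (i, j) does not change any other cell
lemma pvSet_cell_ne (L : List (List Int)) (i j v a b : Int)
    (hi : 0 ≤ i) (hj : 0 ≤ j) (ha : 0 ≤ a) (hb : 0 ≤ b) (hne : a ≠ i ∨ b ≠ j) :
    pvCell (PySem.List.pySetD L i (PySem.List.pySetD (PySem.List.pyGetD L i []) j v)) a b
      = pvCell L a b := by
  obtain ⟨ni, rfl⟩ := Int.eq_ofNat_of_zero_le hi
  obtain ⟨nj, rfl⟩ := Int.eq_ofNat_of_zero_le hj
  obtain ⟨na, rfl⟩ := Int.eq_ofNat_of_zero_le ha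
  obtain ⟨nb, rfl⟩ := Int.eq_ofNat_of_zero_le hb
  have hne' : na ≠ ni ∨ nb ≠ nj := by
    rcases hne with h | h
    · exact Or.inl (fun hh => h (by exact_mod_cast congrArg (Nat.cast : Nat → Int) hh))
    · exact Or.inr (fun hh => h (by exact_mod_cast congrArg (Nat.cast : Nat → Int) hh))
  simp only [pvCell, PySem.List.pySetD_natCast, PySem.List.pyGetD_natCast,
    List.getD_eq_getElem?_getD]
  by_cases hna : na = ni
  · subst hna
    have hbj : nb ≠ nj := by
      rcases hne' with h | h
      · exact absurd rfl h
      · exact h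
    by_cases hlen : na < L.length
    · simp only [List.getElem?_set_self hlen, Option.getD_some, List.getElem?_eq_getElem hlen]
      rw [List.getElem?_set_ne (by omega)]
    · rw [List.set_eq_of_length_le (by omega)]
  · rw [List.getElem?_set_ne (by omega)]

lemma pvAgree_weaken (l₀ L : List (List Int)) (i j j' : Int) (h : pvAgree l₀ L i j)
    (hjj : j ≤ j') : pvAgree l₀ L i j' := by
  intro a b ha hb hc
  refine h a b ha hb ?_
  rcases hc with h1 | ⟨h1, h2⟩
  · exact Or.inl h1
  · exact Or.inr ⟨h1, by omega⟩

lemma pvAgree_next (l₀ L : List (List Int)) (i j : Int) (h : pvAgree l₀ L i j) :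
    pvAgree l₀ L (i + 1) 0 := by
  intro a b ha hb hc
  exact h a b ha hb (Or.inl (by omega))

-- the inner loop: its mx component is the running strict max of the original widths of row i,
-- and its grid component still agrees with the original grid from row i+1 on
lemma pvInner (l₀ : List (List Int)) (hw i : Int) (hi : 0 ≤ i) :
    ∀ (k : Nat) (j0 : Int), 0 ≤ j0 → (hw - j0).toNat = k →
    ∀ (st : Int × List Int × List (List Int)), pvAgree l₀ st.2.2 i j0 →
    ((PySem.List.pyRange j0 hw 1).foldl (pvStepA hw i) st).1
        = (PySem.List.pyRange j0 hw 1).foldl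
            (fun a j => if a < pvW (pvCell l₀ i j) then pvW (pvCell l₀ i j) else a) st.1
      ∧ pvAgree l₀ ((PySem.List.pyRange j0 hw 1).foldl (pvStepA hw i) st).2.2 (i + 1) 0 := by
  intro k
  induction k with
  | zero =>
    intro j0 hj0 hk st hAg
    rw [PySem.List.pyRange_one_eq_nil (by omega)]
    exact ⟨rfl, pvAgree_next _ _ _ _ hAg⟩
  | succ k ih =>
    intro j0 hj0 hk st hAg
    have hread : pvCell st.2.2 i j0 = pvCell l₀ i j0 := hAg i j0 hi hj0 (Or.inr ⟨rfl, le_refl _⟩)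
    have hfst : (pvStepA hw i st j0).1
        = if st.1 < pvW (pvCell l₀ i j0) then pvW (pvCell l₀ i j0) else st.1 := by
      simp only [pvStepA, hread]
    have hAg' : pvAgree l₀ (pvStepA hw i st j0).2.2 i (j0 + 1) := by
      simp only [pvStepA]
      split
      · intro a b ha hb hc
        have hne : a ≠ i ∨ b ≠ j0 := by
          rcases hc with h1 | ⟨h1, h2⟩
          · exact Or.inl (by omega)
          · exact Or.inr (by omega)
        have hcc : i < a ∨ (a = i ∧ j0 ≤ b) := by
          rcases hc with h1 | ⟨h1, h2⟩
          · exact Or.inl h1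
          · exact Or.inr ⟨h1, by omega⟩
        rw [pvSet_cell_ne _ _ _ _ _ _ hi hj0 ha hb hne]
        exact hAg a b ha hb hcc
      · exact pvAgree_weaken _ _ _ _ _ hAg (by omega)
    rw [PySem.List.pyRange_one_cons (by omega)]
    simp only [List.foldl_cons]
    rw [← hfst]
    exact ih (j0 + 1) (by omega) (by omega) (pvStepA hw i st j0) hAg'

-- the outer loop: mx is the nested running strict max of the original widths
lemma pvOuter (l₀ : List (List Int)) (hw : Int) :
    ∀ (k : Nat) (i0 : Int), 0 ≤ i0 → (hw - i0).toNat = k →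
    ∀ (st : Int × List Int × List (List Int)), pvAgree l₀ st.2.2 i0 0 →
    ((PySem.List.pyRange i0 hw 1).foldl
        (fun st i => (PySem.List.pyRange 0 hw 1).foldl (pvStepA hw i) st) st).1
      = (PySem.List.pyRange i0 hw 1).foldl
          (fun a i => (PySem.List.pyRange 0 hw 1).foldl
            (fun a j => if a < pvW (pvCell l₀ i j) then pvW (pvCell l₀ i j) else a) a) st.1 := by
  intro k
  induction k with
  | zero =>
    intro i0 hi0 hk st hAg
    rw [PySem.List.pyRange_one_eq_nil (a := i0) (by omega)]
    rfl
  | succ k ih =>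
    intro i0 hi0 hk st hAg
    obtain ⟨h1, h2⟩ := pvInner l₀ hw i0 hi0 (hw - 0).toNat 0 (by omega) rfl st hAg
    rw [PySem.List.pyRange_one_cons (a := i0) (by omega)]
    simp only [List.foldl_cons]
    rw [← h1]
    exact ih (i0 + 1) (by omega) (by omega)
      ((PySem.List.pyRange 0 hw 1).foldl (pvStepA hw i0) st) h2

-- ===== VERDICT (by name: the statement is the Claim_ definition above) =====
theorem updater_spec : Claim_equal_updater := by
  intro m l hw _ _
  unfold Spec_updater updater updater_alt
  -- push the map over B's pair snapshot through the flatMap: widths of the original cells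
  simp only [List.map_flatMap, List.map_map, Function.comp_def]
  rw [pv_maxD_pos _ (by
    intro x hx
    simp only [List.mem_flatMap, List.mem_map] at hx
    obtain ⟨i, _, j, _, rfl⟩ := hx
    exact pvW_pos _)]
  rw [pv_foldl_flatMap]
  have hA := pvOuter l hw (hw - 0).toNat 0 (by omega) rfl ((0 : Int), ([] : List Int), l)
    (by intro a b _ _ _; rfl)
  rw [hA]
  apply PySem.List.foldl_congr_mem
  intro acc i _
  rw [List.foldl_map]
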